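-- pv_equiv track=rewrite | github.com/matthewmuccio/InterviewPrepKit | saq4.py | scan_right
-- ===== SOURCE A (Python) =====
-- def scan_right(arr):
--     n = len(arr)
--     stack = []
--     right = [0] * n
--     for i in range(n):
--         while stack and arr[i] <= arr[stack[-1]]:
--             top = stack.pop()
--             right[top] = i - top - 1
--         stack.append(i)
--     i += 1
--     while stack:
--         top = stack.pop()
--         right[top] = i - top - 1
--     return right
-- ===== SOURCE B (Python) =====
-- def scan_right(arr):
--     n = len(arr)
--     right = []
--     for i in range(n):
--         j = i + 1
--         while j < n and arr[j] > arr[i]: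
--             j += 1
--         right.append(j - i - 1)
--     return right
-- ===== Notes on version B (the rewrite author's own statement) =====
-- stated objective: simpler
-- what changed: Replaces the monotonic stack plus post-loop drain with an independent forward scan per index (j walks right while arr[j] > arr[i]), building the result by append; no stack and no in-place result array. (Pre_ excludes only the empty list, on which A raises UnboundLocalError.)
import Mathlib
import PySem

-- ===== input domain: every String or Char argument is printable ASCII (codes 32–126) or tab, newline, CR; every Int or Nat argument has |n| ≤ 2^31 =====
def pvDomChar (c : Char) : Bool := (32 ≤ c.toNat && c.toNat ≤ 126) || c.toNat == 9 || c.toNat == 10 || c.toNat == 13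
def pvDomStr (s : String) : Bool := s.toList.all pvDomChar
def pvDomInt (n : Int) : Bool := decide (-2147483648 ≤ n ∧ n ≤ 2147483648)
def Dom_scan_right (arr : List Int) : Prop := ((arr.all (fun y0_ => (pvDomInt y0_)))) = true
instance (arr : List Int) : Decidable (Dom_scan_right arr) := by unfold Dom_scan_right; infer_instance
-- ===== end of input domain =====

-- B replaces A's monotonic stack with an independent forward scan per index (simpler decomposition, no stack or in-place array); A raises on the empty list, which Pre_ excludes and where B returns [].


-- ===== PORT A =====
-- 'while stack and arr[i] <= arr[stack[-1]]: top = stack.pop(); right[top] = i - top - 1'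
-- (stack head = Python stack top; right updated in place via List.set)
def popA (arr : List Int) (i : Nat) : List Nat → List Int → (List Nat × List Int)
  | [], right => ([], right)
  | top :: rest, right =>
    if arr.getD i 0 ≤ arr.getD top 0 then
      popA arr i rest (right.set top ((i : Int) - top - 1))
    else (top :: rest, right)

-- one iteration of 'for i in range(n)': pop loop, then stack.append(i)
def stepA (arr : List Int) (st : List Nat × List Int) (i : Nat) : List Nat × List Int :=
  let (stack', right') := popA arr i st.1 st.2
  (i :: stack', right')

-- final 'while stack' drain (there i = n, from 'i += 1' after the for loop)
def drainA (i : Nat) : List Nat → List Int → List Int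
  | [], right => right
  | top :: rest, right => drainA i rest (right.set top ((i : Int) - top - 1))

def scan_right (arr : List Int) : List Int :=
  let n := arr.length
  let st := (List.range n).foldl (stepA arr) ([], List.replicate n (0 : Int))
  drainA n st.1 st.2

-- ===== PORT B =====
-- 'j = i + 1; while j < n and arr[j] > arr[i]: j += 1' — returns the final j
def innerB (arr : List Int) (v : Int) (j : Nat) : Nat :=
  if h : j < arr.length then
    if v < arr.getD j 0 then innerB arr v (j + 1) else j
  else j
termination_by arr.length - j

-- 'for i in range(n): … right.append(j - i - 1)'
def scan_right_alt (arr : List Int) : List Int :=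
  (List.range arr.length).foldl
    (fun right i => right ++ [((innerB arr (arr.getD i 0) (i + 1) : Int) - i - 1)]) []

-- ===== PRECONDITION & SPEC =====
-- Pre_ excludes only the empty list, on which A raises UnboundLocalError ('i += 1' runs before i is ever bound).
def Pre_scan_right (arr : List Int) : Prop := arr ≠ []
instance (arr : List Int) : Decidable (Pre_scan_right arr) := by unfold Pre_scan_right; infer_instance

def pvWitness_scan_right : List Int := ([3, 1, 2, 1])

def Spec_scan_right (arr : List Int) (out : List Int) : Prop := out = scan_right_alt arr
instance (arr : List Int) (out : List Int) : Decidable (Spec_scan_right arr out) := by unfold Spec_scan_right; infer_instance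

-- ===== CLAIM (what is proved, stated in full; the proofs are below) =====
def Claim_equal_scan_right : Prop := ∀ (arr : List Int), Dom_scan_right arr → Pre_scan_right arr → Spec_scan_right arr (scan_right arr)

-- ===== LEMMAS AND PROOFS =====

theorem innerB_ge (arr : List Int) (v : Int) (j : Nat) : j ≤ innerB arr v j := by
  fun_induction innerB with
  | case1 j h hv ih => omega
  | case2 j h hv => omega
  | case3 j h => omega

theorem innerB_le (arr : List Int) (v : Int) (j : Nat) (hle : j ≤ arr.length) :
    innerB arr v j ≤ arr.length := by
  fun_induction innerB with
  | case1 j h hv ih => exact ih (by omega)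
  | case2 j h hv => omega
  | case3 j h => omega

-- every index strictly before the scan's stopping point holds a strictly larger value
theorem innerB_lt_gt (arr : List Int) (v : Int) (j : Nat) :
    ∀ k, j ≤ k → k < innerB arr v j → v < arr.getD k 0 := by
  fun_induction innerB with
  | case1 j h hv ih =>
    intro k h1 h2
    rcases Nat.eq_or_lt_of_le h1 with rfl | h1'
    · exact hv
    · exact ih k h1' h2
  | case2 j h hv => intro k h1 h2; omega
  | case3 j h => intro k h1 h2; omega

-- if the scan stops inside the list, the value there is ≤ v
theorem innerB_stop (arr : List Int) (v : Int) (j : Nat) :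
    innerB arr v j < arr.length → arr.getD (innerB arr v j) 0 ≤ v := by
  fun_induction innerB with
  | case1 j h hv ih => exact ih
  | case2 j h hv => intro _; omega
  | case3 j h => intro hlt; omega

-- uniqueness: any m with the stopping properties is the scan's result
theorem innerB_eq_of (arr : List Int) (v : Int) (j : Nat) : ∀ (m : Nat), j ≤ m →
    (∀ k, j ≤ k → k < m → v < arr.getD k 0) →
    (m = arr.length ∨ (m < arr.length ∧ arr.getD m 0 ≤ v)) →
    innerB arr v j = m := by
  fun_induction innerB with
  | case1 j h hv ih =>
    intro m hjm hall hstop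
    have hjm' : j + 1 ≤ m := by
      rcases Nat.eq_or_lt_of_le hjm with rfl | h1'
      · rcases hstop with rfl | ⟨_, hle⟩
        · omega
        · exact absurd hle (not_le.mpr hv)
      · omega
    exact ih m hjm' (fun k hk => hall k (by omega)) hstop
  | case2 j h hv =>
    intro m hjm hall hstop
    rcases Nat.eq_or_lt_of_le hjm with rfl | h1'
    · rfl
    · exact absurd (hall j le_rfl h1') hv
  | case3 j h =>
    intro m hjm hall hstop
    rcases hstop with rfl | ⟨hlt, _⟩
    · omega
    · have := hall j le_rfl (by omega); omega

-- A's loop invariant before processing index i: right already holds B's answer for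
-- every index not on the stack, and the stack holds exactly-unresolved indices with
-- strictly increasing values from bottom to top.
def InvA (arr : List Int) (i : Nat) (stack : List Nat) (right : List Int) : Prop :=
  right.length = arr.length ∧
  (∀ t ∈ stack, t < i) ∧
  List.Pairwise (fun a b => arr.getD b 0 < arr.getD a 0) stack ∧
  (∀ t ∈ stack, i ≤ innerB arr (arr.getD t 0) (t + 1)) ∧
  (∀ t, t < i → t ∉ stack → right.getD t 0 = (innerB arr (arr.getD t 0) (t + 1) : Int) - t - 1)

-- when A pops top at step i, B's scan from top stops exactly at i
theorem top_resolved (arr : List Int) (i top : Nat) (hti : top < i) (hi : i < arr.length)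
    (hf : i ≤ innerB arr (arr.getD top 0) (top + 1))
    (hle : arr.getD i 0 ≤ arr.getD top 0) :
    innerB arr (arr.getD top 0) (top + 1) = i := by
  refine innerB_eq_of arr _ _ i (by omega) (fun k hk1 hk2 => ?_) (Or.inr ⟨hi, hle⟩)
  exact innerB_lt_gt arr _ _ k hk1 (by omega)

-- the pop loop + push preserves the invariant from i to i+1
theorem popA_inv (arr : List Int) (i : Nat) (hi : i < arr.length) :
    ∀ (stack : List Nat) (right : List Int), InvA arr i stack right →
      InvA arr (i + 1) (i :: (popA arr i stack right).1) (popA arr i stack right).2 := by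
  intro stack
  induction stack with
  | nil =>
    intro right ⟨hlen, hlt, hpw, hf, hr⟩
    refine ⟨hlen, ?_, ?_, ?_, ?_⟩ <;> simp [popA]
    · exact innerB_ge arr _ _
    · intro t ht hne
      exact hr t (by omega) (by simp)
  | cons top rest ih =>
    intro right ⟨hlen, hlt, hpw, hf, hr⟩
    by_cases hle : arr.getD i 0 ≤ arr.getD top 0
    · -- pop top
      have htop_i : top < i := hlt top (by simp)
      have hres : innerB arr (arr.getD top 0) (top + 1) = i :=
        top_resolved arr i top htop_i hi (hf top (by simp)) hle
      have htop_rest : top ∉ rest := by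
        intro hmem
        exact lt_irrefl _ (List.rel_of_pairwise_cons hpw hmem)
      have hinv' : InvA arr i rest (right.set top ((i : Int) - top - 1)) := by
        refine ⟨by simp [hlen], fun t ht => hlt t (by simp [ht]), hpw.of_cons,
          fun t ht => hf t (by simp [ht]), ?_⟩
        intro t ht hnt
        by_cases hteq : t = top
        · subst hteq
          rw [List.getD_eq_getElem?_getD, List.getElem?_set_self (by omega), Option.getD_some, hres]
        · rw [List.getD_eq_getElem?_getD, List.getElem?_set_ne (fun he => hteq he.symm),
            ← List.getD_eq_getElem?_getD]
          exact hr t ht (by simp [hteq, hnt])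
      have hstep : popA arr i (top :: rest) right
          = popA arr i rest (right.set top ((i : Int) - top - 1)) := by
        rw [popA, if_pos hle]
      rw [hstep]
      exact ih (right.set top ((i : Int) - top - 1)) hinv'
    · -- while-condition fails: stop, push i
      have hstep : popA arr i (top :: rest) right = (top :: rest, right) := by
        rw [popA, if_neg hle]
      rw [hstep]
      have harr_lt : ∀ t ∈ top :: rest, arr.getD t 0 < arr.getD i 0 := by
        intro t ht
        rcases List.mem_cons.mp ht with rfl | hmem
        · omega
        · exact lt_trans (List.rel_of_pairwise_cons hpw hmem) (by omega)
      refine ⟨hlen, ?_, ?_, ?_, ?_⟩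
      · intro t ht
        rcases List.mem_cons.mp ht with rfl | hmem
        · omega
        · exact lt_trans (hlt t hmem) (by omega)
      · exact List.pairwise_cons.mpr ⟨harr_lt, hpw⟩
      · intro t ht
        rcases List.mem_cons.mp ht with rfl | hmem
        · exact innerB_ge arr _ _
        · have hfi := hf t hmem
          rcases Nat.lt_or_ge i (innerB arr (arr.getD t 0) (t + 1)) with h' | h'
          · omega
          · have heq : innerB arr (arr.getD t 0) (t + 1) = i := by omega
            have hstop2 := innerB_stop arr (arr.getD t 0) (t + 1) (by rw [heq]; exact hi)
            rw [heq] at hstop2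
            exact absurd (harr_lt t hmem) (not_lt.mpr hstop2)
      · intro t ht hnt
        simp at hnt
        exact hr t (by omega) (by simp [hnt.2.1, hnt.2.2])

theorem stepA_eq (arr : List Int) (st : List Nat × List Int) (i : Nat) :
    stepA arr st i = (i :: (popA arr i st.1 st.2).1, (popA arr i st.1 st.2).2) := by
  obtain ⟨a, b⟩ := st
  simp [stepA]

-- the invariant holds after the whole for loop
theorem fold_inv (arr : List Int) : ∀ (i : Nat), i ≤ arr.length →
    InvA arr i
      ((List.range i).foldl (stepA arr) ([], List.replicate arr.length (0 : Int))).1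
      ((List.range i).foldl (stepA arr) ([], List.replicate arr.length (0 : Int))).2 := by
  intro i
  induction i with
  | zero =>
    intro _
    exact ⟨by simp, by simp, by simp, by simp, fun t ht => by omega⟩
  | succ i ih =>
    intro hle
    rw [List.range_succ, List.foldl_append]
    have hinv := ih (by omega)
    rw [List.foldl_cons, List.foldl_nil, stepA_eq]
    exact popA_inv arr i (by omega) _ _ hinv

-- draining the stack at i = n completes right to B's answer at every index
theorem drain_inv (arr : List Int) :
    ∀ (stack : List Nat) (right : List Int), InvA arr arr.length stack right →
      (drainA arr.length stack right).length = arr.length ∧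
      ∀ t, t < arr.length →
        (drainA arr.length stack right).getD t 0
          = (innerB arr (arr.getD t 0) (t + 1) : Int) - t - 1 := by
  intro stack
  induction stack with
  | nil =>
    intro right ⟨hlen, _, _, _, hr⟩
    exact ⟨hlen, fun t ht => hr t ht (by simp)⟩
  | cons top rest ih =>
    intro right ⟨hlen, hlt, hpw, hf, hr⟩
    have htop_n : top < arr.length := hlt top (by simp)
    have hres : innerB arr (arr.getD top 0) (top + 1) = arr.length := by
      have h1 := hf top (by simp)
      have h2 := innerB_le arr (arr.getD top 0) (top + 1) (by omega)
      omega
    have htop_rest : top ∉ rest := by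
      intro hmem
      exact lt_irrefl _ (List.rel_of_pairwise_cons hpw hmem)
    have hinv' : InvA arr arr.length rest (right.set top ((arr.length : Int) - top - 1)) := by
      refine ⟨by simp [hlen], fun t ht => hlt t (by simp [ht]), hpw.of_cons,
        fun t ht => hf t (by simp [ht]), ?_⟩
      intro t ht hnt
      by_cases hteq : t = top
      · subst hteq
        rw [List.getD_eq_getElem?_getD, List.getElem?_set_self (by omega), Option.getD_some, hres]
      · rw [List.getD_eq_getElem?_getD, List.getElem?_set_ne (fun he => hteq he.symm),
          ← List.getD_eq_getElem?_getD]
        exact hr t ht (by simp [hteq, hnt])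
    have := ih (right.set top ((arr.length : Int) - top - 1)) hinv'
    simpa [drainA] using this

-- B's append-loop is the map over range
theorem alt_eq_map (arr : List Int) :
    scan_right_alt arr
      = (List.range arr.length).map
          (fun i => ((innerB arr (arr.getD i 0) (i + 1) : Int) - i - 1)) := by
  unfold scan_right_alt
  rw [PySem.List.foldl_append_singleton_eq_map]
  simp

theorem scan_right_eq_alt (arr : List Int) : scan_right arr = scan_right_alt arr := by
  rw [alt_eq_map]
  set st := (List.range arr.length).foldl (stepA arr) ([], List.replicate arr.length (0 : Int)) with hst
  have hscan : scan_right arr = drainA arr.length st.1 st.2 := rfl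
  rw [hscan]
  obtain ⟨hlen, hval⟩ := drain_inv arr st.1 st.2 (fold_inv arr arr.length le_rfl)
  apply List.ext_getElem
  · simp [hlen]
  · intro t h1 h2
    have ht : t < arr.length := by simpa [hlen] using h1
    have := hval t ht
    rw [List.getD_eq_getElem _ _ h1] at this
    rw [this]
    simp [List.getElem_map, List.getElem_range]

-- ===== VERDICT (by name: the statement is the Claim_ definition above) =====
theorem scan_right_spec : Claim_equal_scan_right := by
  intro arr _ _
  unfold Spec_scan_right
  exact scan_right_eq_alt arr
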